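-- pv_equiv track=rewrite | github.com/simondoku/LeetPractice | canSeePersonCount.py | canSeePersonCount
-- ===== SOURCE A (Python) =====
-- def canSeePersonCount(heights):
--     n = len(heights)
--     res = [0]* n
--     stack = []
--
--     for i in range(n-1, -1, -1):
--         while stack and heights[i] > heights[stack[-1]]:
--             stack.pop()
--             res[i] += 1
--
--         if stack:
--             res[i] += 1
--
--         stack.append(i)
--     return res
-- ===== SOURCE B (Python) =====
-- def canSeePersonCount(heights):
--     # For each person, scan the people to the right once, keeping the running
--     # maximum m of the heights strictly between; person j is visible exactly
--     # when no one between is taller-or-equal on the left side (m < own height)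
--     # and j is at least as tall as everyone between (m <= heights[j]).
--     res = []
--     rest = list(heights)
--     while rest:
--         x = rest.pop(0)
--         c = 0
--         m = None
--         for hj in rest:
--             if m is None or (m < x and m <= hj):
--                 c += 1
--             m = hj if m is None else max(m, hj)
--         res.append(c)
--     return res
-- ===== Notes on version B (the rewrite author's own statement) =====
-- stated objective: simpler
-- what changed: Replaces A's right-to-left traversal with a shared monotonic index stack and in-place res[i] updates by an independent per-person left-to-right scan of the people to the right that keeps only a running maximum of the heights in between.
import Mathlib
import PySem

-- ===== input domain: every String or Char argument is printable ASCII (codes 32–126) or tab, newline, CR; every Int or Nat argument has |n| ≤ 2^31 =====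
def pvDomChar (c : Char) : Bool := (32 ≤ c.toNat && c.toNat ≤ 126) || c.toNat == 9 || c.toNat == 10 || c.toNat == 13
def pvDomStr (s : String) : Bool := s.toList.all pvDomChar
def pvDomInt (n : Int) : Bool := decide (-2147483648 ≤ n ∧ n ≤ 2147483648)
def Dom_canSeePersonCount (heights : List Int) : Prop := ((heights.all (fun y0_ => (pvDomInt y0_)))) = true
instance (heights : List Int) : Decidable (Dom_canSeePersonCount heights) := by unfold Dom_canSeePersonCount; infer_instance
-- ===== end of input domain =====

-- B replaces A's right-to-left monotonic index stack by a per-person left-to-right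
-- scan of the people to the right with a running maximum (objective: simpler; no speed claim).

-- ===== PORT A =====
-- res[i] += 1
def pvIncr (res : List Int) (i : Int) : List Int :=
  PySem.List.pySetD res i (PySem.List.pyGetD res i 0 + 1)

-- while stack and heights[i] > heights[stack[-1]]: stack.pop(); res[i] += 1
def pvPopLoop (heights : List Int) (i : Int) (stack res : List Int) : List Int × List Int :=
  if h : stack ≠ [] ∧ PySem.List.pyGetD heights i 0 > PySem.List.pyGetD heights (PySem.List.pyGetD stack (-1) 0) 0 then
    pvPopLoop heights i stack.dropLast (pvIncr res i)
  else (stack, res)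
termination_by stack.length
decreasing_by
  have h1 : stack.length ≠ 0 := by simpa [List.length_eq_zero_iff] using h.1
  simp [List.length_dropLast]; omega

-- loop body of A's for-loop, state (res, stack)
def pvStep (heights : List Int) (st : List Int × List Int) (i : Int) : List Int × List Int :=
  let pr := pvPopLoop heights i st.2 st.1
  let res := if pr.1 ≠ [] then pvIncr pr.2 i else pr.2
  (res, pr.1 ++ [i])

def canSeePersonCount (heights : List Int) : List Int :=
  ((PySem.List.pyRange ((heights.length : Int) - 1) (-1) (-1)).foldl (pvStep heights)
    (List.replicate heights.length 0, [])).1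

-- ===== PORT B =====
-- the inner for-loop of Source B: state (c, m), Python's None ↔ none
def pvSeeStep (x : Int) (st : Int × Option Int) (hj : Int) : Int × Option Int :=
  match st.2 with
  | none => (st.1 + 1, some hj)
  | some m => ((if m < x ∧ m ≤ hj then st.1 + 1 else st.1), some (max m hj))

def pvCountSee (x : Int) (rest : List Int) : Int :=
  (rest.foldl (pvSeeStep x) (0, none)).1

def canSeePersonCount_alt : List Int → List Int
  | [] => []
  | x :: rest => pvCountSee x rest :: canSeePersonCount_alt rest

-- ===== PRECONDITION & SPEC =====
def Spec_canSeePersonCount (heights : List Int) (out : List Int) : Prop := out = canSeePersonCount_alt heights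
instance (heights : List Int) (out : List Int) : Decidable (Spec_canSeePersonCount heights out) := by unfold Spec_canSeePersonCount; infer_instance

-- ===== CLAIM (what is proved, stated in full; the proofs are below) =====
def Claim_equal_canSeePersonCount : Prop := ∀ (heights : List Int), Dom_canSeePersonCount heights → Spec_canSeePersonCount heights (canSeePersonCount heights)

-- ===== LEMMAS AND PROOFS =====

-- abstract "stack of heights" after processing a suffix, top at the head
def pvStk : List Int → List Int
  | [] => []
  | x :: rest => x :: (pvStk rest).dropWhile (fun e => decide (e < x))

-- the count A assigns to a person of height x facing stack s
def pvCnt (x : Int) (s : List Int) : Int :=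
  ((s.takeWhile (fun e => decide (e < x))).length : Int) +
    (if s.dropWhile (fun e => decide (e < x)) = [] then 0 else 1)

def pvG : List Int → List Int
  | [] => []
  | x :: rest => pvCnt x (pvStk rest) :: pvG rest

def pvCntM (x m : Int) (s : List Int) : Int :=
  if m < x then pvCnt x (s.dropWhile (fun e => decide (e < m))) else 0

theorem pvDropWhile_dropWhile (a b : Int) (h : a ≤ b) (s : List Int) :
    (s.dropWhile (fun e => decide (e < a))).dropWhile (fun e => decide (e < b)) =
      s.dropWhile (fun e => decide (e < b)) := by
  induction s with
  | nil => rfl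
  | cons e t ih =>
    by_cases he : e < a
    · have hb : e < b := lt_of_lt_of_le he h
      simp [List.dropWhile_cons, he, hb, ih]
    · simp [List.dropWhile_cons, he]

theorem pvCnt_cons (x hj : Int) (d : List Int) :
    pvCnt x (hj :: d) = 1 + (if hj < x then pvCnt x d else 0) := by
  by_cases hh : hj < x
  · simp only [pvCnt, List.takeWhile_cons, List.dropWhile_cons, hh, decide_true, if_true,
      List.length_cons]
    try push_cast
    try ring
  · simp [pvCnt, hh]

theorem pvCnt_cons_stk (x hj : Int) (t : List Int) :
    pvCnt x (pvStk (hj :: t)) = 1 + pvCntM x hj (pvStk t) := by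
  rw [pvStk, pvCnt_cons, pvCntM]

-- key identity for B's inner loop step
theorem pvCntM_step (x m hj : Int) (s : List Int) :
    pvCntM x m (hj :: s.dropWhile (fun e => decide (e < hj))) =
      (if m < x ∧ m ≤ hj then 1 else 0) + pvCntM x (max m hj) s := by
  by_cases hmh : m ≤ hj
  · have hmax : max m hj = hj := max_eq_right hmh
    by_cases hmx : m < x
    · have hnm : ¬ hj < m := not_lt.mpr hmh
      rw [pvCntM, if_pos hmx]
      simp only [List.dropWhile_cons, hnm, decide_false, Bool.false_eq_true, if_false]
      rw [pvCnt_cons, hmax, pvCntM]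
      rw [if_pos (show m < x ∧ m ≤ hj from ⟨hmx, hmh⟩)]
    · have hjx : ¬ hj < x := fun hlt => hmx (lt_of_le_of_lt hmh hlt)
      simp [pvCntM, hmx, hmax, hjx]
  · have hm : hj < m := lt_of_not_ge hmh
    have hmax : max m hj = m := max_eq_left (le_of_lt hm)
    rw [hmax]
    have hrw : (hj :: s.dropWhile (fun e => decide (e < hj))).dropWhile (fun e => decide (e < m)) =
        s.dropWhile (fun e => decide (e < m)) := by
      simp only [List.dropWhile_cons, hm, decide_true]
      exact pvDropWhile_dropWhile hj m (le_of_lt hm) s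
    simp only [pvCntM, hrw, hmh, false_and, if_false, zero_add, and_false]

-- B's inner loop computes pvCntM against the abstract stack
theorem pvGo_eq (x : Int) (t : List Int) : ∀ (c m : Int),
    (t.foldl (pvSeeStep x) (c, some m)).1 = c + pvCntM x m (pvStk t) := by
  induction t with
  | nil =>
    intro c m
    unfold pvCntM pvCnt
    simp [pvStk]
  | cons hj t ih =>
    intro c m
    simp only [List.foldl_cons, pvSeeStep]
    rw [ih]
    rw [pvStk, pvCntM_step]
    by_cases hc : m < x ∧ m ≤ hj <;> simp [hc] <;> ring

theorem pvCountSee_eq (x : Int) (t : List Int) : pvCountSee x t = pvCnt x (pvStk t) := by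
  cases t with
  | nil => simp [pvCountSee, pvCnt, pvStk]
  | cons hj t =>
    rw [pvCountSee]
    simp only [List.foldl_cons, pvSeeStep]
    rw [pvGo_eq x t (0 + 1) hj, pvCnt_cons_stk]
    ring

theorem pvAlt_eq_g (l : List Int) : canSeePersonCount_alt l = pvG l := by
  induction l with
  | nil => rfl
  | cons x rest ih => rw [canSeePersonCount_alt, pvG, pvCountSee_eq, ih]

-- ======== A-side ========

-- the index stack, reversed (top at the head)
def pvRStk (h : List Int) : Int → List Int → List Int
  | _, [] => []
  | b, x :: rest => b :: (pvRStk h (b + 1) rest).dropWhile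
      (fun j => decide (PySem.List.pyGetD h j 0 < x))

theorem pvRStk_nil (h : List Int) (b : Int) : pvRStk h b [] = [] := rfl

theorem pvRStk_cons (h : List Int) (b x : Int) (rest : List Int) :
    pvRStk h b (x :: rest) = b :: (pvRStk h (b + 1) rest).dropWhile
      (fun j => decide (PySem.List.pyGetD h j 0 < x)) := rfl

def pvNIncr (res : List Int) (i : Int) : Nat → List Int
  | 0 => res
  | k + 1 => pvNIncr (pvIncr res i) i k

theorem pvPopLoop_rev (h : List Int) (i : Int) (r : List Int) : ∀ res,
    pvPopLoop h i r.reverse res =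
      ((r.dropWhile (fun j => decide (PySem.List.pyGetD h j 0 < PySem.List.pyGetD h i 0))).reverse,
       pvNIncr res i (r.takeWhile (fun j => decide (PySem.List.pyGetD h j 0 < PySem.List.pyGetD h i 0))).length) := by
  induction r with
  | nil => intro res; rw [pvPopLoop]; simp [pvNIncr]
  | cons j r ih =>
    intro res
    have hrev : (j :: r).reverse = r.reverse ++ [j] := by simp
    have htop : PySem.List.pyGetD (r.reverse ++ [j]) (-1) 0 = j :=
      PySem.List.pyGetD_neg_one_append_singleton r.reverse j 0
    rw [hrev, pvPopLoop]
    by_cases hc : PySem.List.pyGetD h j 0 < PySem.List.pyGetD h i 0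
    · rw [dif_pos (by simp [htop, hc])]
      rw [List.dropLast_concat, ih (pvIncr res i)]
      simp [List.dropWhile_cons, List.takeWhile_cons, hc, pvNIncr]
    · rw [dif_neg (by simp [htop, hc])]
      simp [List.dropWhile_cons, List.takeWhile_cons, hc, pvNIncr]

theorem pvNIncr_at (i : Nat) (tl : List Int) : ∀ (k : Nat) (c : Int),
    pvNIncr (List.replicate i 0 ++ c :: tl) (i : Int) k = List.replicate i 0 ++ (c + k) :: tl := by
  intro k
  induction k with
  | zero => intro c; simp [pvNIncr]
  | succ k ih =>
    intro c
    rw [pvNIncr, pvIncr]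
    have hget : PySem.List.pyGetD (List.replicate i 0 ++ c :: tl) (i : Int) 0 = c := by
      rw [PySem.List.pyGetD_natCast, List.getD_eq_getElem?_getD]
      simp
    have hset : PySem.List.pySetD (List.replicate i 0 ++ c :: tl) (i : Int) (c + 1) =
        List.replicate i 0 ++ (c + 1) :: tl := by
      rw [PySem.List.pySetD_natCast, List.set_append]
      simp
    rw [hget, hset, ih (c + 1)]
    congr 2
    push_cast; ring

theorem pvIncr_at (i : Nat) (tl : List Int) (c : Int) :
    pvIncr (List.replicate i 0 ++ c :: tl) (i : Int) = List.replicate i 0 ++ (c + 1) :: tl := by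
  have h := pvNIncr_at i tl 1 c
  simpa [pvNIncr] using h

theorem pvValAt (h : List Int) (b : Nat) (x : Int) (rest : List Int) (hb : h.drop b = x :: rest) :
    PySem.List.pyGetD h (b : Int) 0 = x := by
  have hlen : b < h.length := by
    by_contra hh
    rw [List.drop_eq_nil_of_le (le_of_not_gt hh)] at hb
    simp at hb
  rw [PySem.List.pyGetD_natCast, List.getD_eq_getElem?_getD, List.getElem?_eq_getElem hlen]
  have h0 : (h.drop b)[0]'(by rw [hb]; simp) = x := by simp [hb]
  rw [List.getElem_drop] at h0
  simpa using h0

-- mapping the index stack to values gives the abstract stack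
theorem pvRStk_map (h : List Int) : ∀ (l : List Int) (b : Nat), h.drop b = l →
    (pvRStk h (b : Int) l).map (fun j => PySem.List.pyGetD h j 0) = pvStk l := by
  intro l
  induction l with
  | nil => intro b _; rfl
  | cons x rest ih =>
    intro b hb
    have hx := pvValAt h b x rest hb
    have hrest : h.drop (b + 1) = rest := by
      rw [← List.drop_drop, hb]
      rfl
    rw [pvRStk_cons, pvStk]
    simp only [List.map_cons, hx]
    have hcast : ((b : Int) + 1) = ((b + 1 : Nat) : Int) := by push_cast; ring
    rw [hcast]
    conv_rhs => rw [← ih (b + 1) hrest]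
    rw [List.dropWhile_map]
    rfl

-- main loop invariant for A, processed suffix = h.drop i
theorem pvInv (h : List Int) : ∀ (l : List Int) (i : Nat), h.drop i = l →
    i + l.length = h.length →
    (PySem.List.pyRange (i : Int) (h.length : Int) 1).foldr (fun x acc => pvStep h acc x)
      (List.replicate h.length 0, ([] : List Int)) =
      (List.replicate i 0 ++ pvG l, (pvRStk h (i : Int) l).reverse) := by
  intro l
  induction l with
  | nil =>
    intro i hdrop hlen
    have hi : i = h.length := by simpa using hlen
    subst hi
    rw [PySem.List.pyRange_one_eq_nil (le_refl _)]
    simp [pvG, pvRStk_nil]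
  | cons x rest ih =>
    intro i hdrop hlen
    have hx := pvValAt h i x rest hdrop
    have hrest : h.drop (i + 1) = rest := by
      rw [← List.drop_drop, hdrop]
      rfl
    have hlt : (i : Int) < (h.length : Int) := by
      simp at hlen; omega
    rw [PySem.List.pyRange_one_cons hlt]
    have hcast : ((i : Int) + 1) = ((i + 1 : Nat) : Int) := by push_cast; ring
    rw [List.foldr_cons, hcast, ih (i + 1) hrest (by simp at hlen; omega)]
    -- now compute one step
    simp only [pvStep]
    have hmap := pvRStk_map h rest (i + 1) hrest
    set r := pvRStk h ((i + 1 : Nat) : Int) rest with hr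
    have hsplit : List.replicate (i + 1) (0 : Int) ++ pvG rest =
        List.replicate i 0 ++ (0 : Int) :: pvG rest := by
      rw [List.replicate_succ', List.append_assoc]; rfl
    rw [hsplit]
    have hpop := pvPopLoop_rev h (i : Int) r (List.replicate i 0 ++ (0 : Int) :: pvG rest)
    rw [hx] at hpop
    simp only [hpop, pvNIncr_at]
    -- takeWhile / dropWhile over the index stack correspond to those over pvStk rest
    have htake : (r.takeWhile (fun j => decide (PySem.List.pyGetD h j 0 < x))).length =
        ((pvStk rest).takeWhile (fun e => decide (e < x))).length := by
      rw [← hmap, List.takeWhile_map, List.length_map]; rfl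
    have hdropm : (pvStk rest).dropWhile (fun e => decide (e < x)) =
        (r.dropWhile (fun j => decide (PySem.List.pyGetD h j 0 < x))).map
          (fun j => PySem.List.pyGetD h j 0) := by
      rw [← hmap, List.dropWhile_map]; rfl
    have hstk : pvRStk h (i : Int) (x :: rest) =
        (i : Int) :: r.dropWhile (fun j => decide (PySem.List.pyGetD h j 0 < x)) := by
      rw [pvRStk_cons, hcast]
    by_cases hnil : r.dropWhile (fun j => decide (PySem.List.pyGetD h j 0 < x)) = []
    · have hnil' : (pvStk rest).dropWhile (fun e => decide (e < x)) = [] := by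
        rw [hdropm, hnil]; rfl
      simp only [hnil, List.reverse_nil, ne_eq, not_true_eq_false, if_false, ite_false]
      rw [hstk, hnil]
      simp only [Prod.mk.injEq]
      refine ⟨?_, rfl⟩
      rw [pvG, pvCnt, hnil', if_pos rfl, htake]
      norm_num
    · have hnil' : (pvStk rest).dropWhile (fun e => decide (e < x)) ≠ [] := by
        rw [hdropm]; simp [hnil]
      have hrevnil : (r.dropWhile (fun j => decide (PySem.List.pyGetD h j 0 < x))).reverse ≠ [] := by
        simp [hnil]
      simp only [hrevnil, ne_eq, not_false_eq_true, if_true, ite_true]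
      rw [pvIncr_at, hstk]
      simp only [Prod.mk.injEq]
      constructor
      · rw [pvG, pvCnt, if_neg hnil', htake]
        norm_num
      · simp
  
theorem pvA_eq_g (h : List Int) : canSeePersonCount h = pvG h := by
  rw [canSeePersonCount]
  rw [PySem.List.pyRange_neg_one_eq_reverse]
  have h1 : ((h.length : Int) - 1) + 1 = (h.length : Int) := by ring
  rw [h1, List.foldl_reverse]
  rw [show ((-1 : Int) + 1) = 0 from by norm_num]
  have := pvInv h h 0 rfl (by simp)
  norm_num at this
  rw [this]

-- ===== VERDICT (by name: the statement is the Claim_ definition above) =====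
theorem canSeePersonCount_spec : Claim_equal_canSeePersonCount := by
  intro heights _
  unfold Spec_canSeePersonCount
  rw [pvA_eq_g, pvAlt_eq_g]
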